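-- pv_equiv track=rewrite | github.com/sbkaleci/PirlantaGPT-Semantic-Search-API | search.py | merge_chunks_by_chapter
-- ===== SOURCE A (Python) =====
-- def merge_chunks_by_chapter(chunks):
--     """
--     Merges chunks belonging to the same chapter into a single cohesive text.
--     Returns a dictionary where keys are (book_title, chapter_title) and values are merged texts.
--     """
--     chapter_map = {}
--     for chunk_id, book_title, chapter_title, local_index, text in chunks:
--         key = (book_title, chapter_title)
--         if key not in chapter_map:
--             chapter_map[key] = []
--         chapter_map[key].append((local_index, text))
--
--     # Sort chunks by local_index and merge the text for each chapter
--     merged_chapters = []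
--     for (book_title, chapter_title), chunk_list in chapter_map.items():
--         sorted_chunks = sorted(chunk_list, key=lambda x: x[0])  # Sort by local_index
--         merged_text = " ".join(text for _, text in sorted_chunks)
--         merged_chapters.append({
--             "book_title": book_title,
--             "chapter_title": chapter_title,
--             "text": merged_text
--         })
--
--     return merged_chapters
-- ===== SOURCE B (Python) =====
-- def merge_chunks_by_chapter(chunks):
--     """
--     Same result as A, but keeps each chapter's bucket sorted by local_index
--     while building it (stable online insertion), so no per-bucket sort pass
--     is needed at the end.
--     """
--     buckets = {}
--     for chunk_id, book_title, chapter_title, local_index, text in chunks: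
--         lst = buckets.setdefault((book_title, chapter_title), [])
--         i = 0
--         while i < len(lst) and lst[i][0] <= local_index:
--             i += 1
--         lst.insert(i, (local_index, text))
--     return [
--         {"book_title": book, "chapter_title": chap,
--          "text": " ".join(t for _, t in lst)}
--         for (book, chap), lst in buckets.items()
--     ]
-- ===== Notes on version B (the rewrite author's own statement) =====
-- stated objective: alternative
-- what changed: Instead of collecting each chapter's chunks and running sorted() on every bucket at the end, B keeps each bucket sorted by local_index while building it (stable online insertion after equal indices), so the output pass only joins the texts.
import Mathlib
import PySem

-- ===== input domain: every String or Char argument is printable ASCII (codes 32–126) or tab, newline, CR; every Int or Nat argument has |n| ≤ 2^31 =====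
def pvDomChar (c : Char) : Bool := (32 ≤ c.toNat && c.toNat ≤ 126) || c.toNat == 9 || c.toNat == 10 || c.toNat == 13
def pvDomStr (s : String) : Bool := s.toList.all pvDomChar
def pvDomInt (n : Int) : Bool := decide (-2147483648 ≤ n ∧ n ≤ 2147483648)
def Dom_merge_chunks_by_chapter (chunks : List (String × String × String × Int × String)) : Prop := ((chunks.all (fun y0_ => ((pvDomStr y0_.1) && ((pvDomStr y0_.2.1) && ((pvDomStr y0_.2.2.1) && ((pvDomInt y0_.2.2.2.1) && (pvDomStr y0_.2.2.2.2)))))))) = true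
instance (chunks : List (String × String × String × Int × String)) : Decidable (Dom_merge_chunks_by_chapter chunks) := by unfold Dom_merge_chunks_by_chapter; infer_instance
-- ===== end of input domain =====

-- B keeps each chapter bucket sorted by local_index while building it (stable online insertion),
-- so no per-bucket sort is needed at the end; same return value as A (alternative decomposition).

-- ===== PORT A =====
-- 'if key not in chapter_map: chapter_map[key] = []' followed by 'chapter_map[key].append(…)'
-- is exactly Dict.modify key [] (· ++ [(local_index, text)]) (default-[] then append, position kept).
def merge_chunks_by_chapter (chunks : List (String × String × String × Int × String)) : List (List (String × String)) :=
  let chapter_map : PySem.Dict (String × String) (List (Int × String)) :=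
    chunks.foldl (fun d ch =>
      d.modify (ch.2.1, ch.2.2.1) [] (· ++ [(ch.2.2.2.1, ch.2.2.2.2)])) PySem.Dict.empty
  chapter_map.items.map (fun kv =>
    let sorted_chunks := PySem.List.sorted kv.2 (fun x => x.1) false
    let merged_text := PySem.Str.join " " (sorted_chunks.map (fun p => p.2))
    [("book_title", kv.1.1), ("chapter_title", kv.1.2), ("text", merged_text)])

-- ===== PORT B =====
-- the 'while i < len(lst) and lst[i][0] <= local_index: i += 1; lst.insert(i, …)' loop of Source B
def pvInsLoop (li : Int) (text : String) : List (Int × String) → List (Int × String)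
  | [] => [(li, text)]
  | p :: rest => if p.1 ≤ li then p :: pvInsLoop li text rest else (li, text) :: p :: rest

def merge_chunks_by_chapter_alt (chunks : List (String × String × String × Int × String)) : List (List (String × String)) :=
  let buckets : PySem.Dict (String × String) (List (Int × String)) :=
    chunks.foldl (fun d ch =>
      d.modify (ch.2.1, ch.2.2.1) [] (pvInsLoop ch.2.2.2.1 ch.2.2.2.2)) PySem.Dict.empty
  buckets.items.map (fun kv =>
    [("book_title", kv.1.1), ("chapter_title", kv.1.2),
     ("text", PySem.Str.join " " (kv.2.map (fun p => p.2)))])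

-- ===== PRECONDITION & SPEC =====
def Spec_merge_chunks_by_chapter (chunks : List (String × String × String × Int × String)) (out : List (List (String × String))) : Prop := out = merge_chunks_by_chapter_alt chunks
instance (chunks : List (String × String × String × Int × String)) (out : List (List (String × String))) : Decidable (Spec_merge_chunks_by_chapter chunks out) := by unfold Spec_merge_chunks_by_chapter; infer_instance

-- ===== CLAIM (what is proved, stated in full; the proofs are below) =====
def Claim_equal_merge_chunks_by_chapter : Prop := ∀ (chunks : List (String × String × String × Int × String)), Dom_merge_chunks_by_chapter chunks → Spec_merge_chunks_by_chapter chunks (merge_chunks_by_chapter chunks)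

-- ===== LEMMAS AND PROOFS =====

-- a modify-loop keyed by 'key', read at c: fold the update over exactly the elements with key c
theorem pv_getD_foldl_modify {κ β α : Type} [BEq κ] [LawfulBEq κ] [DecidableEq κ]
    (key : α → κ) (g : α → List β → List β)
    (l : List α) (d : PySem.Dict κ (List β)) (c : κ) :
    (l.foldl (fun d x => d.modify (key x) [] (g x)) d).getD c []
      = (l.filter (fun x => key x == c)).foldl (fun acc x => g x acc) (d.getD c []) := by
  induction l generalizing d with
  | nil => rfl
  | cons x l ih =>
    simp only [List.foldl_cons, List.filter_cons]
    by_cases h : key x = c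
    · subst h
      simp [ih, PySem.Dict.getD_modify_self]
    · have hne : (key x == c) = false := by simp [h]
      rw [ih]
      have hg : (d.modify (key x) [] (g x)).getD c [] = d.getD c [] := by
        rw [PySem.Dict.getD_modify]
        exact if_neg (fun hc => h hc.symm)
      simp [hne, hg]

theorem pv_insLoop_eq_insertBy (li : Int) (t : String) (ys : List (Int × String)) :
    pvInsLoop li t ys
      = PySem.List.insertBy (fun a b => decide ((fun (x : Int × String) => x.1) a < (fun (x : Int × String) => x.1) b)) (li, t) ys := by
  induction ys with
  | nil => rfl
  | cons p rest ih =>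
    by_cases h : p.1 ≤ li
    · simp [pvInsLoop, PySem.List.insertBy, h, not_lt.mpr h, ih]
    · simp [pvInsLoop, PySem.List.insertBy, h, not_le.mp h]

theorem pv_foldl_append {α β : Type} (f : α → β) (l : List α) (acc : List β) :
    l.foldl (fun acc x => acc ++ [f x]) acc = acc ++ l.map f := by
  induction l generalizing acc with
  | nil => simp
  | cons x l ih => simp [ih]

set_option maxHeartbeats 1000000 in
-- the B-side bucket at key c is exactly the sorted A-side bucket at key c
theorem pv_bucket_sorted (chunks : List (String × String × String × Int × String)) (c : String × String) :
    (chunks.foldl (fun d ch =>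
        d.modify (ch.2.1, ch.2.2.1) [] (pvInsLoop ch.2.2.2.1 ch.2.2.2.2)) PySem.Dict.empty).getD c []
      = PySem.List.sorted
          ((chunks.foldl (fun d ch =>
              d.modify (ch.2.1, ch.2.2.1) [] (· ++ [(ch.2.2.2.1, ch.2.2.2.2)])) PySem.Dict.empty).getD c [])
          (fun x => x.1) false := by
  have h1 : (chunks.foldl (fun d ch =>
      d.modify (ch.2.1, ch.2.2.1) [] (pvInsLoop ch.2.2.2.1 ch.2.2.2.2)) PySem.Dict.empty).getD c []
      = (chunks.filter (fun ch => ((ch.2.1, ch.2.2.1) : String × String) == c)).foldl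
          (fun acc ch => pvInsLoop ch.2.2.2.1 ch.2.2.2.2 acc) ((PySem.Dict.empty : PySem.Dict (String × String) (List (Int × String))).getD c []) :=
    pv_getD_foldl_modify (fun ch => (ch.2.1, ch.2.2.1))
      (fun ch => pvInsLoop ch.2.2.2.1 ch.2.2.2.2) chunks PySem.Dict.empty c
  have h2 : (chunks.foldl (fun d ch =>
      d.modify (ch.2.1, ch.2.2.1) [] (· ++ [(ch.2.2.2.1, ch.2.2.2.2)])) PySem.Dict.empty).getD c []
      = (chunks.filter (fun ch => ((ch.2.1, ch.2.2.1) : String × String) == c)).foldl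
          (fun acc ch => acc ++ [(ch.2.2.2.1, ch.2.2.2.2)]) ((PySem.Dict.empty : PySem.Dict (String × String) (List (Int × String))).getD c []) :=
    pv_getD_foldl_modify (fun ch => (ch.2.1, ch.2.2.1))
      (fun ch acc => acc ++ [(ch.2.2.2.1, ch.2.2.2.2)]) chunks PySem.Dict.empty c
  rw [h1, h2]
  simp only [PySem.Dict.getD_empty]
  rw [pv_foldl_append, List.nil_append,
      PySem.List.sorted_eq_foldl_insertBy, List.foldl_map]
  exact PySem.List.foldl_congr_mem _ _ _ _ (fun acc x _ => pv_insLoop_eq_insertBy x.2.2.2.1 x.2.2.2.2 acc)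

theorem merge_chunks_equal (chunks : List (String × String × String × Int × String)) :
    merge_chunks_by_chapter chunks = merge_chunks_by_chapter_alt chunks := by
  have hndA : (chunks.foldl (fun d ch =>
      d.modify (ch.2.1, ch.2.2.1) [] (· ++ [(ch.2.2.2.1, ch.2.2.2.2)])) PySem.Dict.empty).keys.Nodup :=
    PySem.Dict.nodup_keys_foldl_modify_key chunks (fun ch => (ch.2.1, ch.2.2.1)) []
      (fun _ ch => (· ++ [(ch.2.2.2.1, ch.2.2.2.2)])) PySem.Dict.empty (by simp [PySem.Dict.keys_empty])
  have hndB : (chunks.foldl (fun d ch =>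
      d.modify (ch.2.1, ch.2.2.1) [] (pvInsLoop ch.2.2.2.1 ch.2.2.2.2)) PySem.Dict.empty).keys.Nodup :=
    PySem.Dict.nodup_keys_foldl_modify_key chunks (fun ch => (ch.2.1, ch.2.2.1)) []
      (fun _ ch => pvInsLoop ch.2.2.2.1 ch.2.2.2.2) PySem.Dict.empty (by simp [PySem.Dict.keys_empty])
  have hk : (chunks.foldl (fun d ch =>
      d.modify (ch.2.1, ch.2.2.1) [] (· ++ [(ch.2.2.2.1, ch.2.2.2.2)])) PySem.Dict.empty).keys
      = (chunks.foldl (fun d ch =>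
      d.modify (ch.2.1, ch.2.2.1) [] (pvInsLoop ch.2.2.2.1 ch.2.2.2.2)) PySem.Dict.empty).keys :=
    (PySem.Dict.keys_foldl_modify_key chunks (fun ch => (ch.2.1, ch.2.2.1)) []
      (fun _ ch => (· ++ [(ch.2.2.2.1, ch.2.2.2.2)])) PySem.Dict.empty).trans
    (PySem.Dict.keys_foldl_modify_key chunks (fun ch => (ch.2.1, ch.2.2.1)) []
      (fun _ ch => pvInsLoop ch.2.2.2.1 ch.2.2.2.2) PySem.Dict.empty).symm
  have hiA : (chunks.foldl (fun d ch =>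
      d.modify (ch.2.1, ch.2.2.1) [] (· ++ [(ch.2.2.2.1, ch.2.2.2.2)])) PySem.Dict.empty).items
      = (chunks.foldl (fun d ch =>
          d.modify (ch.2.1, ch.2.2.1) [] (· ++ [(ch.2.2.2.1, ch.2.2.2.2)])) PySem.Dict.empty).keys.map
        (fun k => (k, (chunks.foldl (fun d ch =>
          d.modify (ch.2.1, ch.2.2.1) [] (· ++ [(ch.2.2.2.1, ch.2.2.2.2)])) PySem.Dict.empty).getD k [])) :=
    PySem.Dict.items_eq_map_keys _ hndA []
  have hiB : (chunks.foldl (fun d ch =>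
      d.modify (ch.2.1, ch.2.2.1) [] (pvInsLoop ch.2.2.2.1 ch.2.2.2.2)) PySem.Dict.empty).items
      = (chunks.foldl (fun d ch =>
          d.modify (ch.2.1, ch.2.2.1) [] (pvInsLoop ch.2.2.2.1 ch.2.2.2.2)) PySem.Dict.empty).keys.map
        (fun k => (k, (chunks.foldl (fun d ch =>
          d.modify (ch.2.1, ch.2.2.1) [] (pvInsLoop ch.2.2.2.1 ch.2.2.2.2)) PySem.Dict.empty).getD k [])) :=
    PySem.Dict.items_eq_map_keys _ hndB []
  show ((chunks.foldl (fun d ch =>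
      d.modify (ch.2.1, ch.2.2.1) [] (· ++ [(ch.2.2.2.1, ch.2.2.2.2)])) PySem.Dict.empty).items.map
      (fun kv => [("book_title", kv.1.1), ("chapter_title", kv.1.2),
        ("text", PySem.Str.join " " ((PySem.List.sorted kv.2 (fun x => x.1) false).map (fun p => p.2)))]))
    = ((chunks.foldl (fun d ch =>
      d.modify (ch.2.1, ch.2.2.1) [] (pvInsLoop ch.2.2.2.1 ch.2.2.2.2)) PySem.Dict.empty).items.map
      (fun kv => [("book_title", kv.1.1), ("chapter_title", kv.1.2),
        ("text", PySem.Str.join " " (kv.2.map (fun p => p.2)))]))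
  rw [hiA, hiB, ← hk, List.map_map, List.map_map]
  refine List.map_congr_left (fun k _ => ?_)
  simp only [Function.comp]
  rw [pv_bucket_sorted chunks k]
-- ===== VERDICT (by name: the statement is the Claim_ definition above) =====
theorem merge_chunks_by_chapter_spec : Claim_equal_merge_chunks_by_chapter := by
  intro chunks _
  unfold Spec_merge_chunks_by_chapter
  exact merge_chunks_equal chunks
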